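-- pv_equiv track=rewrite | github.com/mahita12/Skill_Gap_Analysis | dynamic_skill_gap_analysis.py | filter_technical_skills
-- ===== SOURCE A (Python) =====
-- def filter_technical_skills(key_phrases):
--     technical_keywords = set([
--         "python", "java", "c++", "javascript", "sql", "html", "css", "aws", "azure", "docker", "kubernetes",
--         "machine learning", "data science", "artificial intelligence", "deep learning", "tensorflow", "pytorch",
--         "react", "angular", "node.js", "django", "flask", "git", "linux", "unix", "bash", "shell scripting",
--         "agile", "scrum", "project management", "devops", "cloud computing", "big data", "hadoop", "spark"
--     ])
--     return [phrase for phrase in key_phrases if any(keyword in phrase.lower() for keyword in technical_keywords)]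
-- ===== SOURCE B (Python) =====
-- # Keywords kept as one compact '|'-joined table, split at import time and grouped
-- # by first character; each phrase is then scanned once left-to-right, testing only
-- # the keywords whose first character matches the current one.
-- _KEYWORDS = (
--     "python|java|c++|javascript|sql|html|css|aws|azure|docker|kubernetes|"
--     "machine learning|data science|artificial intelligence|deep learning|tensorflow|pytorch|"
--     "react|angular|node.js|django|flask|git|linux|unix|bash|shell scripting|"
--     "agile|scrum|project management|devops|cloud computing|big data|hadoop|spark"
-- ).split("|")
--
-- _BY_FIRST = {}
-- for _k in _KEYWORDS:
--     _BY_FIRST.setdefault(_k[0], []).append(_k)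
--
--
-- def _has_keyword(low):
--     # one left-to-right scan: at each position, try as prefixes only the keywords
--     # that start with the character found there
--     for i, c in enumerate(low):
--         for k in _BY_FIRST.get(c, ()):
--             if low.startswith(k, i):
--                 return True
--     return False
--
--
-- def filter_technical_skills(key_phrases):
--     result = []
--     for phrase in key_phrases:
--         if _has_keyword(phrase.lower()):
--             result.append(phrase)
--     return result
-- ===== Notes on version B (the rewrite author's own statement) =====
-- stated objective: alternative
-- what changed: Instead of running a separate substring search ('keyword in phrase') for every keyword, B groups the keywords (kept as one '|'-joined table split at import time) into a dict keyed by first character and makes one left-to-right scan over each lowered phrase, testing as prefixes only the keywords whose bucket matches the character at the current position - a naive multi-pattern matcher in which the per-keyword 'in' scans disappear.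
import Mathlib
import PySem

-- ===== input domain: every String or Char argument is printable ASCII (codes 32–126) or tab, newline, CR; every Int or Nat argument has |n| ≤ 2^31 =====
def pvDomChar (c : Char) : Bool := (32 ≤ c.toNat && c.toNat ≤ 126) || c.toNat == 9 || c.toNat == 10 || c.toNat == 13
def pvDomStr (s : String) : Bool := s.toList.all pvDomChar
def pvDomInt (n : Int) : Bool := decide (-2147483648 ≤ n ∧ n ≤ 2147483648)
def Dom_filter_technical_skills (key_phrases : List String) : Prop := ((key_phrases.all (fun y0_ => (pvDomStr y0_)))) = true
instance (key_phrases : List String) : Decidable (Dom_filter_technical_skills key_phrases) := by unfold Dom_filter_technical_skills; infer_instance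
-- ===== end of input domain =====

set_option maxRecDepth 40000

-- B replaces A's per-keyword substring searches by one left-to-right scan of each lowered
-- phrase, dispatching through a table of keywords grouped by first character (objective: alternative).

-- ===== PORT A =====
-- technical_keywords = set([...])
def pvTechnicalKeywordsA : List String := PySem.Set.ofList
  ["python", "java", "c++", "javascript", "sql", "html", "css", "aws", "azure", "docker", "kubernetes",
   "machine learning", "data science", "artificial intelligence", "deep learning", "tensorflow", "pytorch",
   "react", "angular", "node.js", "django", "flask", "git", "linux", "unix", "bash", "shell scripting",
   "agile", "scrum", "project management", "devops", "cloud computing", "big data", "hadoop", "spark"]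

-- [phrase for phrase in key_phrases if any(keyword in phrase.lower() for keyword in technical_keywords)]
def filter_technical_skills (key_phrases : List String) : List String :=
  key_phrases.filter (fun phrase =>
    pvTechnicalKeywordsA.any (fun keyword => PySem.Str.isIn keyword (PySem.Str.lower phrase)))

-- ===== PORT B =====
-- _KEYWORDS = "…|…".split("|")
def pvKeywordsB : List String :=
  -- (sep "|" is nonempty, so split? never returns none)
  (PySem.Str.split? "python|java|c++|javascript|sql|html|css|aws|azure|docker|kubernetes|machine learning|data science|artificial intelligence|deep learning|tensorflow|pytorch|react|angular|node.js|django|flask|git|linux|unix|bash|shell scripting|agile|scrum|project management|devops|cloud computing|big data|hadoop|spark" "|").getD []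

-- _BY_FIRST: for _k in _KEYWORDS: _BY_FIRST.setdefault(_k[0], []).append(_k)
-- (_k[0] never raises: every piece of the split is nonempty)
def pvByFirst : PySem.Dict Char (List String) :=
  pvKeywordsB.foldl
    (fun d k =>
      let c := (k.toList.head?).getD ' '
      d.insert c (d.getD c [] ++ [k]))
    PySem.Dict.empty

-- _has_keyword(low): for i, c in enumerate(low): for k in _BY_FIRST.get(c, ()):
--   if low.startswith(k, i): return True
def pvHasKeyword (low : List Char) : Bool :=
  (PySem.List.enumerate low).any (fun p =>
    (pvByFirst.getD p.2 []).any (fun k => PySem.Chars.startswith (low.drop p.1.toNat) k.toList))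

def filter_technical_skills_alt (key_phrases : List String) : List String :=
  key_phrases.foldl (fun result phrase =>
    if pvHasKeyword (PySem.Chars.lower phrase.toList) then result ++ [phrase] else result) []

-- ===== PRECONDITION & SPEC =====
def Spec_filter_technical_skills (key_phrases : List String) (out : List String) : Prop := out = filter_technical_skills_alt key_phrases
instance (key_phrases : List String) (out : List String) : Decidable (Spec_filter_technical_skills key_phrases out) := by unfold Spec_filter_technical_skills; infer_instance

-- ===== CLAIM (what is proved, stated in full; the proofs are below) =====
def Claim_equal_filter_technical_skills : Prop := ∀ (key_phrases : List String), Dom_filter_technical_skills key_phrases → Spec_filter_technical_skills key_phrases (filter_technical_skills key_phrases)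

-- ===== LEMMAS AND PROOFS =====

-- proof-side literal copy of the keyword table (kernel-fast to compare; not used by either port)
def pvKwLit : List String :=
  ["python", "java", "c++", "javascript", "sql", "html", "css", "aws", "azure", "docker", "kubernetes",
   "machine learning", "data science", "artificial intelligence", "deep learning", "tensorflow", "pytorch",
   "react", "angular", "node.js", "django", "flask", "git", "linux", "unix", "bash", "shell scripting",
   "agile", "scrum", "project management", "devops", "cloud computing", "big data", "hadoop", "spark"]

-- B's split table is that literal list
theorem pvKwB_lit : pvKeywordsB = pvKwLit := by decide

-- A's keyword set is that literal list too
theorem pvA_eq_lit : pvTechnicalKeywordsA = pvKwLit := by decide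

-- B's first-character table, with the split replaced by the literal list
theorem pvByFirst_lit : pvByFirst = pvKwLit.foldl
    (fun d k =>
      let c := (k.toList.head?).getD ' '
      d.insert c (d.getD c [] ++ [k]))
    PySem.Dict.empty := by
  unfold pvByFirst
  rw [pvKwB_lit]

-- no keyword is empty
theorem pvKw_nonempty : pvKwLit.all (fun k => !k.toList.isEmpty) = true := by decide

-- every keyword is in the bucket of its own first character
theorem pvKw_in_bucket : pvKwLit.all
    (fun k => (pvByFirst.getD ((k.toList.head?).getD ' ') []).contains k) = true := by
  rw [pvByFirst_lit]; decide

-- every bucket entry of the table is a keyword whose first character is the bucket's key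
theorem pvBuckets_sound : pvByFirst.items.all
    (fun p => p.2.all (fun k => decide (k ∈ pvKwLit) && (k.toList.head? == some p.1))) = true := by
  rw [pvByFirst_lit]; decide

-- a successful first-match lookup finds a pair of the association list
theorem pv_get?_mem {ν : Type} (d : PySem.Dict Char ν) (c : Char) (v : ν)
    (h : d.get? c = some v) : (c, v) ∈ d.items := by
  rcases d with ⟨l⟩
  induction l with
  | nil => simp [PySem.Dict.get?] at h
  | cons p rest ih =>
    obtain ⟨k0, v0⟩ := p
    rw [PySem.Dict.get?_mk_cons] at h
    by_cases hc : k0 = c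
    · subst hc
      simp at h
      subst h
      simp
    · rw [if_neg (by simpa using hc)] at h
      have := ih h
      simp at this ⊢
      exact Or.inr this

-- membership in a looked-up bucket characterised: a keyword starting with that character
theorem pv_bucket_mem (c : Char) (k : String) (hk : k ∈ pvByFirst.getD c []) :
    k ∈ pvKwLit ∧ k.toList.head? = some c := by
  rw [PySem.Dict.getD] at hk
  cases h : pvByFirst.get? c with
  | none => rw [h] at hk; simp at hk
  | some ks =>
    rw [h] at hk
    simp at hk
    have hmem := pv_get?_mem pvByFirst c ks h
    have hs := List.all_eq_true.mp pvBuckets_sound _ hmem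
    have := List.all_eq_true.mp hs k hk
    simp at this
    exact this

-- per phrase, A's predicate (some keyword is a substring) equals B's (some position whose
-- bucket holds a keyword that is a prefix there)
theorem pvPred_eq (low : List Char) :
    pvTechnicalKeywordsA.any (fun keyword => PySem.Chars.isIn keyword.toList low)
      = pvHasKeyword low := by
  rw [pvA_eq_lit]
  unfold pvHasKeyword
  rw [Bool.eq_iff_iff]
  simp only [List.any_eq_true, PySem.Chars.startswith_iff]
  constructor
  · rintro ⟨k, hk, hin⟩
    obtain ⟨j, hj⟩ := (PySem.Chars.exists_prefix_drop_iff_isIn k.toList low).mpr hin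
    cases hc : k.toList with
    | nil =>
      -- no keyword is empty
      exfalso
      have hne := List.all_eq_true.mp pvKw_nonempty k hk
      rw [hc] at hne
      simp at hne
    | cons c t =>
      rw [hc] at hj
      obtain ⟨r, hr⟩ := hj
      have hlen : j < low.length := by
        by_contra h
        rw [List.drop_eq_nil_of_le (by omega)] at hr
        simp at hr
      have hj0 : low[j]? = some c := by
        have h0 : (low.drop j)[0]? = some c := by rw [← hr]; simp
        rw [List.getElem?_drop] at h0
        simpa using h0
      refine ⟨((j : Int), c), ?_, ?_⟩
      · rw [PySem.List.mem_enumerate_iff]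
        refine ⟨j, hlen, ?_⟩
        simp only [zero_add]
        congr 1
        have := List.getElem?_eq_getElem hlen
        rw [this] at hj0
        exact (Option.some.inj hj0).symm
      · have hbk := List.all_eq_true.mp pvKw_in_bucket k hk
        rw [hc] at hbk
        simp only [List.head?_cons, Option.getD_some, List.contains_eq_mem, decide_eq_true_eq] at hbk
        refine ⟨k, hbk, ?_⟩
        simp only [Int.toNat_natCast]
        rw [hc]
        exact ⟨r, hr⟩
  · rintro ⟨⟨i, c⟩, hp, k, hk, hpre⟩
    obtain ⟨hkw, _⟩ := pv_bucket_mem c k hk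
    exact ⟨k, hkw,
      (PySem.Chars.exists_prefix_drop_iff_isIn k.toList low).mp ⟨i.toNat, hpre⟩⟩

-- ===== VERDICT (by name: the statement is the Claim_ definition above) =====
theorem filter_technical_skills_spec : Claim_equal_filter_technical_skills := by
  intro key_phrases _
  unfold Spec_filter_technical_skills filter_technical_skills filter_technical_skills_alt
  have := PySem.List.foldl_append_if
    (fun phrase => pvHasKeyword (PySem.Chars.lower phrase.toList)) (fun x => x) key_phrases []
  rw [this]
  simp only [List.map_id', List.nil_append]
  congr 1
  funext phrase
  rw [← pvPred_eq]
  simp [PySem.Str.isIn, PySem.Str.lower]
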